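-- pv_equiv track=rewrite | github.com/moogah007/prueba-demo-bo-v12 | odoo_l10n_ar/l10n_ar_electronic_invoice_report/models/account_invoice.py | get_verification_code
-- ===== SOURCE A (Python) =====
-- def get_verification_code(bar_code):
--     """
--     Obtiene el codigo verificador segun el codigo de barra segun resol170204
--     http://www.afip.gov.ar/afip/resol170204.html
--     """
--     # TODO: Pasar esta funcion a una libreria externa para reutilizar.
--
--     try:
--         barcode = int(bar_code)
--     except ValueError:
--         raise Warning('No se pudo generar el codigo de barras')
--
--     barcode_numbers_list = list(map(int, str(barcode)))
--
--     # Etapa 1: comenzar desde la izquierda, sumar todos los caracteres ubicados en las posiciones impares.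
--     first = sum(odd for odd in barcode_numbers_list[0::2])
--
--     # Etapa 2: multiplicar la suma obtenida en la etapa 1 por el n�mero 3
--     second = first * 3
--
--     # Etapa 3: comenzar desde la izquierda, sumar todos los caracteres que est�n ubicados en las posiciones pares.
--     third = sum(pair for pair in barcode_numbers_list[1::2])
--
--     # Etapa 4: sumar los resultados obtenidos en las etapas 2 y 3.
--     fourth = third + second
--
--     return str(10 - (fourth % 10) if fourth % 10 is not 0 else 0)
-- ===== SOURCE B (Python) =====
-- def get_verification_code(bar_code):
--     """
--     Obtiene el codigo verificador segun el codigo de barra segun resol170204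
--     http://www.afip.gov.ar/afip/resol170204.html
--     """
--     try:
--         barcode = int(bar_code)
--     except ValueError:
--         raise Warning('No se pudo generar el codigo de barras')
--
--     total = 0
--     for i, ch in enumerate(str(barcode)):
--         d = int(ch)
--         total += 3 * d if i % 2 == 0 else d
--
--     return str((10 - total % 10) % 10)
-- ===== Notes on version B (the rewrite author's own statement) =====
-- stated objective: simpler
-- what changed: Replaces the two step-2 slices and the four-stage arithmetic (first/second/third/fourth) plus a conditional remainder expression by a single enumerate pass keeping one weighted running total and the closed form str((10 - total % 10) % 10).
import Mathlib
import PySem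

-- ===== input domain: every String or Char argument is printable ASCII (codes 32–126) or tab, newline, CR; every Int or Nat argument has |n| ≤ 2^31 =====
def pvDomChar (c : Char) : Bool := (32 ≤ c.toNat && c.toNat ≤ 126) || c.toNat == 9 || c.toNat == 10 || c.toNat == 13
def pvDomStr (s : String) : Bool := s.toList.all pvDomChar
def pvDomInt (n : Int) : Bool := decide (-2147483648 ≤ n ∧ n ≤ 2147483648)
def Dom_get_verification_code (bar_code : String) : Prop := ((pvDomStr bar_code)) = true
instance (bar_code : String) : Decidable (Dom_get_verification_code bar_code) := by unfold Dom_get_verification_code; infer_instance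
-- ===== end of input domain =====

-- B replaces A's two step-2 slices and four named stages by one enumerate pass with a
-- weighted running total and the closed form str((10 - total % 10) % 10); same cost.

-- int(ch) for a single character ch (both Pythons convert each digit character this way);
-- on Pre_ every ch is a decimal digit, so ofChars? is some and the getD default is unused
def pvDig (c : Char) : Int := (PySem.Int.ofChars? [c]).getD 0

-- ===== PORT A =====
def get_verification_code (bar_code : String) : String :=
  match PySem.Int.ofStr? bar_code with
  | none => "No se pudo generar el codigo de barras"  -- Python raises Warning here; excluded by Pre_
  | some barcode =>
    -- list(map(int, str(barcode))); for a negative barcode the conversion of the sign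
    -- character raises ValueError (uncaught in Python): excluded by Pre_
    let ds : List Int := (PySem.Int.toStr barcode).toList.map pvDig
    let first := ((PySem.List.slice? ds (some 0) none 2).getD []).sum
    let second := first * 3
    let third := ((PySem.List.slice? ds (some 1) none 2).getD []).sum
    let fourth := third + second
    PySem.Int.toStr (if PySem.Int.mod fourth 10 ≠ 0 then 10 - PySem.Int.mod fourth 10 else 0)

-- ===== PORT B =====
def get_verification_code_alt (bar_code : String) : String :=
  match PySem.Int.ofStr? bar_code with
  | none => "No se pudo generar el codigo de barras"  -- Python raises Warning here; excluded by Pre_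
  | some barcode =>
    -- for i, ch in enumerate(str(barcode)): total += 3*int(ch) if i % 2 == 0 else int(ch)
    -- (for a negative barcode int(ch) on the sign character raises ValueError: excluded by Pre_)
    let total :=
      (PySem.List.enumerate (PySem.Int.toStr barcode).toList 0).foldl
        (fun acc p => acc + (if PySem.Int.mod p.1 2 = 0 then 3 * pvDig p.2 else pvDig p.2)) 0
    PySem.Int.toStr (PySem.Int.mod (10 - PySem.Int.mod total 10) 10)

-- ===== PRECONDITION & SPEC =====
-- Pre_ excludes exactly the inputs on which the Python A raises: strings int() rejects
-- (A raises Warning) and strings denoting a negative integer (the digit loop raises ValueError);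
-- B raises identically there, so nothing A returns on is excluded.
def Pre_get_verification_code (bar_code : String) : Prop :=
  0 ≤ (PySem.Int.ofStr? bar_code).getD (-1)
instance (bar_code : String) : Decidable (Pre_get_verification_code bar_code) := by
  unfold Pre_get_verification_code; infer_instance
def pvWitness_get_verification_code : String := "123456"

def Spec_get_verification_code (bar_code : String) (out : String) : Prop := out = get_verification_code_alt bar_code
instance (bar_code : String) (out : String) : Decidable (Spec_get_verification_code bar_code out) := by unfold Spec_get_verification_code; infer_instance

-- ===== CLAIM (what is proved, stated in full; the proofs are below) =====
def Claim_equal_get_verification_code : Prop := ∀ (bar_code : String), Dom_get_verification_code bar_code → Pre_get_verification_code bar_code → Spec_get_verification_code bar_code (get_verification_code bar_code)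

-- ===== LEMMAS AND PROOFS =====

-- (evens, odds): the elements at even and at odd positions (proof-only helper)
def pvSplit {α : Type} : List α → List α × List α
  | [] => ([], [])
  | x :: t => ((x :: (pvSplit t).2), (pvSplit t).1)

theorem pv_slice0_eq (ds : List Int) :
    PySem.List.slice? ds (some 0) none 2 =
      some (List.filterMap (fun k => ds[2*k]?) (List.range ((ds.length+1)/2))) := by
  simp only [PySem.List.slice?, PySem.List.sliceIndices]
  norm_num
  have h1 : (if 0 < ds.length then (((ds.length : Int) + 2 - 1) / 2).toNat else 0)
      = (ds.length+1)/2 := by split <;> omega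
  rw [h1]
  apply List.filterMap_congr
  intro x _
  congr 1

theorem pv_slice1_eq (ds : List Int) :
    PySem.List.slice? ds (some 1) none 2 =
      some (List.filterMap (fun k => ds[2*k+1]?) (List.range (ds.length/2))) := by
  simp only [PySem.List.slice?, PySem.List.sliceIndices]
  norm_num
  have h1 : (if 1 < ds.length then (((ds.length : Int) - min 1 (ds.length : Int) + 2 - 1) / 2).toNat else 0)
      = ds.length/2 := by split <;> omega
  rw [h1]
  apply List.filterMap_congr
  intro x hx
  have := List.mem_range.mp hx
  congr 1
  omega

theorem pvSplit_filt {α : Type} (ds : List α) :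
    List.filterMap (fun k => ds[2*k]?) (List.range ((ds.length+1)/2)) = (pvSplit ds).1 ∧
    List.filterMap (fun k => ds[2*k+1]?) (List.range (ds.length/2)) = (pvSplit ds).2 := by
  induction ds with
  | nil => simp [pvSplit]
  | cons x t ih =>
    constructor
    · have hl : ((x :: t).length + 1)/2 = t.length/2 + 1 := by simp; omega
      rw [hl, List.range_succ_eq_map, List.filterMap_cons]
      simp only [List.filterMap_map]
      have : List.filterMap ((fun k => (x::t)[2*k]?) ∘ (fun k => k+1)) (List.range (t.length/2))
          = List.filterMap (fun k => t[2*k+1]?) (List.range (t.length/2)) := by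
        apply List.filterMap_congr
        intro k _
        show (x::t)[2*(k+1)]? = t[2*k+1]?
        have h2 : 2*(k+1) = (2*k+1)+1 := by omega
        rw [h2, List.getElem?_cons_succ]
      simp only [Function.comp] at this ⊢
      rw [this]
      simp [pvSplit, ih.2]
    · have hl : ((x :: t).length)/2 = (t.length+1)/2 := by simp
      rw [hl]
      have : List.filterMap (fun k => (x::t)[2*k+1]?) (List.range ((t.length+1)/2))
          = List.filterMap (fun k => t[2*k]?) (List.range ((t.length+1)/2)) := by
        apply List.filterMap_congr
        intro k _
        rw [List.getElem?_cons_succ]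
      rw [this]
      simp [pvSplit, ih.1]

theorem pvSplit_map {α β : Type} (f : α → β) (cs : List α) :
    pvSplit (cs.map f) = ((pvSplit cs).1.map f, (pvSplit cs).2.map f) := by
  induction cs with
  | nil => simp [pvSplit]
  | cons c t ih => simp [pvSplit, ih]

theorem pvFold (cs : List Char) (n acc : Int) :
    (PySem.List.enumerate cs n).foldl
        (fun acc p => acc + (if PySem.Int.mod p.1 2 = 0 then 3 * pvDig p.2 else pvDig p.2)) acc
      = acc + (if PySem.Int.mod n 2 = 0
               then 3 * ((pvSplit cs).1.map pvDig).sum + ((pvSplit cs).2.map pvDig).sum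
               else ((pvSplit cs).1.map pvDig).sum + 3 * ((pvSplit cs).2.map pvDig).sum) := by
  induction cs generalizing n acc with
  | nil => simp [PySem.List.enumerate, pvSplit]
  | cons c t ih =>
    rw [PySem.List.enumerate_cons, List.foldl_cons, ih (n+1)]
    have h0 : PySem.Int.mod n 2 = n % 2 := by
      simp only [PySem.Int.mod]; rw [Int.fmod_eq_emod]; omega
    have h1 : PySem.Int.mod (n+1) 2 = (n+1) % 2 := by
      simp only [PySem.Int.mod]; rw [Int.fmod_eq_emod]; omega
    rcases em (PySem.Int.mod n 2 = 0) with h | h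
    · rw [if_pos h]
      have : PySem.Int.mod (n+1) 2 ≠ 0 := by rw [h1]; rw [h0] at h; omega
      rw [if_neg this]
      simp [pvSplit]
      have hd : (2:Int) ∣ n := by rw [h0] at h; omega
      rw [if_pos hd]
      ring
    · rw [if_neg h]
      have : PySem.Int.mod (n+1) 2 = 0 := by rw [h1]; rw [h0] at h; omega
      rw [if_pos this]
      simp [pvSplit]
      have hd : ¬ (2:Int) ∣ n := by rw [h0] at h; omega
      rw [if_neg hd]
      ring

theorem pvFin (F : Int) :
    (if PySem.Int.mod F 10 ≠ 0 then 10 - PySem.Int.mod F 10 else 0)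
      = PySem.Int.mod (10 - PySem.Int.mod F 10) 10 := by
  simp only [PySem.Int.mod, Int.fmod_eq_emod]
  norm_num
  split <;> omega

theorem get_verification_code_spec : Claim_equal_get_verification_code := by
  intro bar_code _ hpre
  unfold Spec_get_verification_code
  unfold get_verification_code get_verification_code_alt
  cases h : PySem.Int.ofStr? bar_code with
  | none => rfl
  | some n =>
    simp only
    set cs := (PySem.Int.toStr n).toList with hcs
    rw [pv_slice0_eq, pv_slice1_eq, pvFold cs 0 0,
        (pvSplit_filt (cs.map pvDig)).1, (pvSplit_filt (cs.map pvDig)).2,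
        pvSplit_map pvDig cs]
    have hz : PySem.Int.mod 0 2 = 0 := by decide
    rw [if_pos hz]
    rw [show (0 + (3 * ((pvSplit cs).1.map pvDig).sum + ((pvSplit cs).2.map pvDig).sum) : Int)
          = ((pvSplit cs).2.map pvDig).sum + ((pvSplit cs).1.map pvDig).sum * 3 from by ring]
    exact congrArg PySem.Int.toStr (pvFin _)
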